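-- pv_equiv track=rewrite | github.com/daniel-reich/ubiquitous-fiesta | 7RrPMoWifqRHPPqj2_24.py | safecracker
-- ===== SOURCE A (Python) =====
-- def safecracker(start, increments):
--   def dial(x):
--     while True:
--       y = yield x % 100
--       x -= y
--       y = yield x % 100
--       x += y
--
--   g = dial(start)
--   g.send(None)
--
--   return list(map(lambda x: g.send(x), increments))
-- ===== SOURCE B (Python) =====
-- def safecracker(start, increments):
--     out = []
--     x = start
--     sign = -1
--     for inc in increments:
--         x += sign * inc
--         sign = -sign
--         out.append(x % 100)
--     return out
-- ===== Notes on version B (the rewrite author's own statement) =====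
-- stated objective: idiomatic
-- what changed: Replaced the generator coroutine (dial + prime + map over g.send) with a plain loop maintaining a running value and an alternating sign, appending x % 100 each step.
import Mathlib
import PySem

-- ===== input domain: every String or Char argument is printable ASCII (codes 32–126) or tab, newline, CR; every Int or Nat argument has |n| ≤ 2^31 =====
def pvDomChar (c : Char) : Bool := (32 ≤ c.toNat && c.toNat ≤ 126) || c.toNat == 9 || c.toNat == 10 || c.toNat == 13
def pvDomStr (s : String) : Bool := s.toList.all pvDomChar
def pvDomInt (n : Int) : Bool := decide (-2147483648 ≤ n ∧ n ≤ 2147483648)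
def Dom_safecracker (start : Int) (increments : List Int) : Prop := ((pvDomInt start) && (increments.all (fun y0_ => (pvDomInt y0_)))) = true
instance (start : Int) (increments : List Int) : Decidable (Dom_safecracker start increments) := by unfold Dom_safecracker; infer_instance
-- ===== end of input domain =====

-- B replaces A's generator coroutine with a plain loop over the increments keeping a
-- running value and an alternating sign (idiomatic; same cost). Return values only.

-- ===== PORT A =====
-- The coroutine `dial` alternately subtracts and adds each sent increment and yields
-- x % 100 after every update; `list(map(g.send, increments))` consumes the increments
-- two per loop iteration of the coroutine body, so the port recurses two at a time.
def safecrackerDial (x : Int) (incs : List Int) : List Int :=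
  match incs with
  | [] => []
  | a :: rest =>
    let x1 := x - a
    PySem.Int.mod x1 100 ::
      (match rest with
       | [] => []
       | b :: rest2 =>
         let x2 := x1 + b
         PySem.Int.mod x2 100 :: safecrackerDial x2 rest2)

def safecracker (start : Int) (increments : List Int) : List Int :=
  safecrackerDial start increments

-- ===== PORT B =====
-- Source B: one foldl over increments with state (x, sign, out); sign starts at -1 and flips.
def safecracker_alt (start : Int) (increments : List Int) : List Int :=
  (increments.foldl
    (fun (s : Int × Int × List Int) inc =>
      let x := s.1 + s.2.1 * inc
      (x, -s.2.1, s.2.2 ++ [PySem.Int.mod x 100]))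
    (start, -1, [])).2.2

-- ===== PRECONDITION & SPEC =====
def Spec_safecracker (start : Int) (increments : List Int) (out : List Int) : Prop := out = safecracker_alt start increments
instance (start : Int) (increments : List Int) (out : List Int) : Decidable (Spec_safecracker start increments out) := by unfold Spec_safecracker; infer_instance

-- ===== CLAIM (what is proved, stated in full; the proofs are below) =====
def Claim_equal_safecracker : Prop := ∀ (start : Int) (increments : List Int), Dom_safecracker start increments → Spec_safecracker start increments (safecracker start increments)

-- ===== LEMMAS AND PROOFS =====

-- One B step with sign -1 (subtract), one with sign 1 (add); match them to two levels
-- of safecrackerDial. Strong induction on the list length handles the two-at-a-time shape.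
theorem safecracker_fold_eq (n : Nat) :
    ∀ (incs : List Int), incs.length ≤ n → ∀ (x : Int) (acc : List Int),
      (incs.foldl
        (fun (s : Int × Int × List Int) inc =>
          let x := s.1 + s.2.1 * inc
          (x, -s.2.1, s.2.2 ++ [PySem.Int.mod x 100]))
        (x, -1, acc)).2.2 = acc ++ safecrackerDial x incs := by
  induction n with
  | zero =>
    intro incs h x acc
    have : incs = [] := List.length_eq_zero_iff.mp (Nat.le_zero.mp h)
    subst this; simp [safecrackerDial]
  | succ n ih =>
    intro incs h x acc
    match incs with
    | [] => simp [safecrackerDial]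
    | [a] =>
      simp [List.foldl, safecrackerDial]
      ring_nf
    | a :: b :: rest =>
      have hlen : rest.length ≤ n := by
        simp at h; omega
      simp only [List.foldl]
      have h1 : x + -1 * a = x - a := by ring
      have h2 : (x - a) + -(-1 : Int) * b = (x - a) + b := by ring
      rw [show (-(-1 : Int)) = 1 by norm_num] at *
      have := ih rest hlen ((x - a) + b)
        ((acc ++ [PySem.Int.mod (x + -1 * a) 100]) ++ [PySem.Int.mod (x + -1 * a + 1 * b) 100])
      simp only [h1] at *
      simp only [show (x - a) + 1 * b = (x - a) + b by ring] at *
      rw [this]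
      simp [safecrackerDial]

-- ===== VERDICT (by name: the statement is the Claim_ definition above) =====
theorem safecracker_spec : Claim_equal_safecracker := by
  intro start increments _
  unfold Spec_safecracker safecracker safecracker_alt
  rw [safecracker_fold_eq increments.length increments (le_refl _) start []]
  simp
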